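-- pv_equiv track=rewrite | github.com/prataprohit851/LeetCode | 2120-execution-of-all-suffix-instructions-staying-in-a-grid/2120-execution-of-all-suffix-instructions-staying-in-a-grid.py | executeInstructions
-- ===== SOURCE A (Python) =====
-- from typing import List
--
-- def executeInstructions(n: int, startPos: List[int], s: str) -> List[int]:
--     li = []
--     count = 0;
--     ini = startPos[0]
--     inj = startPos[1]
--     for i in range(len(s)):
--         for j in range(i, len(s)):
--             if s[j] == 'R' : startPos[1] += 1
--             elif s[j] == 'L' : startPos[1] -= 1
--             elif s[j] == 'U' : startPos[0] -= 1
--             elif s[j] == 'D' : startPos[0] += 1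
--
--             if (startPos[1] > -1 and startPos[1] < n and startPos[0] > -1 and startPos[0] < n) : count += 1
--             else : startPos = [-1,-1]
--         startPos = [ini, inj]
--         li.append(count)
--         count = 0
--     return li
-- ===== SOURCE B (Python) =====
-- from typing import List
--
-- def _first_escape(n, sr, sc, pr, pc, i, m):
--     for j in range(i, m):
--         r = sr + pr[j + 1] - pr[i]
--         c = sc + pc[j + 1] - pc[i]
--         if not (0 <= r < n and 0 <= c < n):
--             return j - i
--     return m - i
--
-- def executeInstructions(n: int, startPos: List[int], s: str) -> List[int]:
--     sr, sc = startPos[0], startPos[1]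
--     m = len(s)
--     pr, pc = [0], [0]
--     cr = cc = 0
--     for ch in s:
--         cr += 1 if ch == 'D' else (-1 if ch == 'U' else 0)
--         cc += 1 if ch == 'R' else (-1 if ch == 'L' else 0)
--         pr.append(cr)
--         pc.append(cc)
--     return [_first_escape(n, sr, sc, pr, pc, i, m) for i in range(m)]
-- ===== Notes on version B (the rewrite author's own statement) =====
-- stated objective: faster
-- what changed: B replaces A's per-suffix stateful re-simulation (with [-1,-1] poisoning after leaving the grid) by precomputed prefix displacement sums and, per suffix, a scan that returns at the first out-of-bounds position instead of walking the whole remaining suffix.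
import Mathlib
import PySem

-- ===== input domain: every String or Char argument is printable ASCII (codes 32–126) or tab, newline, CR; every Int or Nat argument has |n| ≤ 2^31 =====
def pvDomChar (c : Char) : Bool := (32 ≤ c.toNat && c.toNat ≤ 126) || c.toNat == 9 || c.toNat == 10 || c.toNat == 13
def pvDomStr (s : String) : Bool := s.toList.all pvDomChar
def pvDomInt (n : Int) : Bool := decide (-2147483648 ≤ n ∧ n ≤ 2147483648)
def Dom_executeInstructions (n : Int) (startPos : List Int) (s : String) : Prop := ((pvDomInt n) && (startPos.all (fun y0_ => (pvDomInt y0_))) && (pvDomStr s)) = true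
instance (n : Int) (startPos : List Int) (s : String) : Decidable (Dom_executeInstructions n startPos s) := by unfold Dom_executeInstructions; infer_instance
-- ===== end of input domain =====

-- B replaces A's per-suffix stateful simulation (with its [-1,-1] poisoning) by prefix
-- displacement sums and a first-escape scan per suffix (objective: alternative).
-- A mutates the caller's startPos list in Python; B does not — the claim is about the
-- return value only.

-- ===== PORT A =====
-- one inner-loop step of A: apply the move branch chain, then count / poison
def pvAStep (n : Int) (st : Int × Int × Int) (c : Char) : Int × Int × Int :=
  let p0 := st.1
  let p1 := st.2.1
  let count := st.2.2
  let q : Int × Int :=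
    if c = 'R' then (p0, p1 + 1)
    else if c = 'L' then (p0, p1 - 1)
    else if c = 'U' then (p0 - 1, p1)
    else if c = 'D' then (p0 + 1, p1)
    else (p0, p1)
  if q.2 > -1 ∧ q.2 < n ∧ q.1 > -1 ∧ q.1 < n then (q.1, q.2, count + 1)
  else (-1, -1, count)

def executeInstructions (n : Int) (startPos : List Int) (s : String) : List Int :=
  match PySem.List.pyGet? startPos 0, PySem.List.pyGet? startPos 1 with
  | some ini, some inj =>
      let cs := s.toList
      (List.range cs.length).foldl
        (fun li i => li ++ [((cs.drop i).foldl (pvAStep n) (ini, inj, 0)).2.2]) []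
  | _, _ => []   -- A raises IndexError here (startPos shorter than 2); outside Pre_

-- ===== PORT B =====
-- row/column displacement of one instruction character
def pvDR (c : Char) : Int := if c = 'D' then 1 else if c = 'U' then -1 else 0
def pvDC (c : Char) : Int := if c = 'R' then 1 else if c = 'L' then -1 else 0

-- the loop of Source B building the prefix-sum lists pr, pc together with running sums
def pvPrefix (cs : List Char) : (List Int × List Int) × (Int × Int) :=
  cs.foldl
    (fun st ch =>
      let cr := st.2.1 + pvDR ch
      let cc := st.2.2 + pvDC ch
      ((st.1.1 ++ [cr], st.1.2 ++ [cc]), (cr, cc)))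
    (([0], [0]), (0, 0))

-- Source B's _first_escape: scan j over range(i, m), return j-i at the first out-of-bounds
-- position (computed from the prefix sums), else m-i
def pvFirstEscape (n sr sc : Int) (pr pc : List Int) (i m : Nat) : List Nat → Int
  | [] => (m : Int) - (i : Int)
  | j :: rest =>
      let r := sr + pr.getD (j + 1) 0 - pr.getD i 0
      let c := sc + pc.getD (j + 1) 0 - pc.getD i 0
      if 0 ≤ r ∧ r < n ∧ 0 ≤ c ∧ c < n then pvFirstEscape n sr sc pr pc i m rest
      else (j : Int) - (i : Int)

def executeInstructions_alt (n : Int) (startPos : List Int) (s : String) : List Int :=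
  -- Source B raises IndexError when startPos has fewer than 2 elements; [] stands in (outside Pre_)
  (PySem.List.pyGet? startPos 0).elim [] (fun sr =>
    (PySem.List.pyGet? startPos 1).elim [] (fun sc =>
      let cs := s.toList
      let m := cs.length
      let p := pvPrefix cs
      (List.range m).map (fun i => pvFirstEscape n sr sc p.1.1 p.1.2 i m (List.range' i (m - i)))))

-- ===== PRECONDITION & SPEC =====
-- Pre_ excludes exactly the inputs where A raises IndexError: startPos with fewer than 2 elements.
def Pre_executeInstructions (n : Int) (startPos : List Int) (s : String) : Prop := 2 ≤ startPos.length
instance (n : Int) (startPos : List Int) (s : String) : Decidable (Pre_executeInstructions n startPos s) := by unfold Pre_executeInstructions; infer_instance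

def pvWitness_executeInstructions : Int × List Int × String := (3, [0, 1], "RRDDLU")

def Spec_executeInstructions (n : Int) (startPos : List Int) (s : String) (out : List Int) : Prop := out = executeInstructions_alt n startPos s
instance (n : Int) (startPos : List Int) (s : String) (out : List Int) : Decidable (Spec_executeInstructions n startPos s out) := by unfold Spec_executeInstructions; infer_instance

-- ===== CLAIM (what is proved, stated in full; the proofs are below) =====
def Claim_equal_executeInstructions : Prop := ∀ (n : Int) (startPos : List Int) (s : String), Dom_executeInstructions n startPos s → Pre_executeInstructions n startPos s → Spec_executeInstructions n startPos s (executeInstructions n startPos s)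

-- ===== LEMMAS AND PROOFS =====

-- reference function: number of steps the walk from (r,c) stays in the grid
def pvGo (n : Int) : List Char → Int → Int → Int
  | [], _, _ => 0
  | ch :: t, r, c =>
      let r' := r + pvDR ch
      let c' := c + pvDC ch
      if 0 ≤ r' ∧ r' < n ∧ 0 ≤ c' ∧ c' < n then 1 + pvGo n t r' c' else 0

-- pvDC/pvDR take values in {-1,0,1} and never both nonzero
theorem pvD_vals (c : Char) : (pvDR c = 1 ∨ pvDR c = -1 ∨ pvDR c = 0) ∧
    (pvDC c = 1 ∨ pvDC c = -1 ∨ pvDC c = 0) ∧ (pvDR c = 0 ∨ pvDC c = 0) := by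
  unfold pvDR pvDC
  split_ifs <;> simp_all

-- the move branch chain of A equals adding the displacements
theorem pvAStep_move (n : Int) (p0 p1 cnt : Int) (c : Char) :
    pvAStep n (p0, p1, cnt) c =
      if 0 ≤ p1 + pvDC c ∧ p1 + pvDC c < n ∧ 0 ≤ p0 + pvDR c ∧ p0 + pvDR c < n
      then (p0 + pvDR c, p1 + pvDC c, cnt + 1) else (-1, -1, cnt) := by
  by_cases hR : c = 'R'
  · subst hR; simp only [pvAStep, pvDR, pvDC]
    simp only [Char.reduceEq, if_true, if_false]
    split_ifs <;> first | (exfalso; omega) | simp [sub_eq_add_neg]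
  by_cases hL : c = 'L'
  · subst hL; simp only [pvAStep, pvDR, pvDC]
    simp only [Char.reduceEq, if_true, if_false]
    split_ifs <;> first | (exfalso; omega) | simp [sub_eq_add_neg]
  by_cases hU : c = 'U'
  · subst hU; simp only [pvAStep, pvDR, pvDC]
    simp only [Char.reduceEq, if_true, if_false]
    split_ifs <;> first | (exfalso; omega) | simp [sub_eq_add_neg]
  by_cases hD : c = 'D'
  · subst hD; simp only [pvAStep, pvDR, pvDC]
    simp only [Char.reduceEq, if_true, if_false]
    split_ifs <;> first | (exfalso; omega) | simp [sub_eq_add_neg]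
  · simp only [pvAStep, pvDR, pvDC, if_neg hR, if_neg hL, if_neg hU, if_neg hD]
    split_ifs <;> first | (exfalso; omega) | simp [sub_eq_add_neg]

-- the poisoned state is a fixed point of A's inner step
theorem pvAStep_poison (n : Int) (cnt : Int) (c : Char) :
    pvAStep n (-1, -1, cnt) c = (-1, -1, cnt) := by
  rw [pvAStep_move]
  obtain ⟨hr, hc, hx⟩ := pvD_vals c
  have h : ¬ (0 ≤ (-1 : Int) + pvDC c ∧ (-1 : Int) + pvDC c < n ∧
      0 ≤ (-1 : Int) + pvDR c ∧ (-1 : Int) + pvDR c < n) := by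
    rcases hr with h1 | h1 | h1 <;> rcases hc with h2 | h2 | h2 <;> rcases hx with h3 | h3 <;> omega
  rw [if_neg h]

theorem pvA_foldl_poison (n : Int) (cnt : Int) (l : List Char) :
    l.foldl (pvAStep n) (-1, -1, cnt) = (-1, -1, cnt) := by
  induction l with
  | nil => rfl
  | cons c t ih => simp [List.foldl, pvAStep_poison, ih]

-- A's inner loop counts exactly the in-grid steps of the walk
theorem pvA_inner_eq_go (n : Int) (l : List Char) (r c cnt : Int) :
    (l.foldl (pvAStep n) (r, c, cnt)).2.2 = cnt + pvGo n l r c := by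
  induction l generalizing r c cnt with
  | nil => simp [pvGo]
  | cons ch t ih =>
      simp only [List.foldl, pvGo, pvAStep_move]
      by_cases h : 0 ≤ r + pvDR ch ∧ r + pvDR ch < n ∧ 0 ≤ c + pvDC ch ∧ c + pvDC ch < n
      · have h' : 0 ≤ c + pvDC ch ∧ c + pvDC ch < n ∧ 0 ≤ r + pvDR ch ∧ r + pvDR ch < n := by tauto
        simp only [if_pos h, if_pos h', ih]
        ring
      · have h' : ¬ (0 ≤ c + pvDC ch ∧ c + pvDC ch < n ∧ 0 ≤ r + pvDR ch ∧ r + pvDR ch < n) := by tauto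
        simp [if_neg h, if_neg h', pvA_foldl_poison]

-- the prefix-sum values
def pvPr (cs : List Char) (k : Nat) : Int := ((cs.take k).map pvDR).sum
def pvPc (cs : List Char) (k : Nat) : Int := ((cs.take k).map pvDC).sum

theorem pvPr_zero (cs : List Char) : pvPr cs 0 = 0 := by simp [pvPr]
theorem pvPc_zero (cs : List Char) : pvPc cs 0 = 0 := by simp [pvPc]

theorem pvPr_cons (ch : Char) (t : List Char) (k : Nat) :
    pvPr (ch :: t) (k + 1) = pvDR ch + pvPr t k := by
  simp [pvPr, List.take_succ_cons]

theorem pvPc_cons (ch : Char) (t : List Char) (k : Nat) :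
    pvPc (ch :: t) (k + 1) = pvDC ch + pvPc t k := by
  simp [pvPc, List.take_succ_cons]

theorem pvPrefix_spec : ∀ (cs : List Char) (ar ac : List Int) (cr cc : Int),
    cs.foldl
      (fun st ch =>
        let cr := st.2.1 + pvDR ch
        let cc := st.2.2 + pvDC ch
        ((st.1.1 ++ [cr], st.1.2 ++ [cc]), (cr, cc)))
      ((ar, ac), (cr, cc)) =
      ((ar ++ (List.range cs.length).map (fun k => cr + pvPr cs (k + 1)),
        ac ++ (List.range cs.length).map (fun k => cc + pvPc cs (k + 1))),
       (cr + pvPr cs cs.length, cc + pvPc cs cs.length)) := by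
  intro cs
  induction cs with
  | nil => intro ar ac cr cc; simp [pvPr, pvPc]
  | cons ch t ih =>
      intro ar ac cr cc
      simp only [List.foldl_cons]
      rw [ih]
      simp only [List.length_cons, List.range_succ_eq_map, List.map_cons, List.map_map]
      simp [pvPr_cons, pvPc_cons, pvPr_zero, pvPc_zero, Function.comp, add_assoc,
            List.append_assoc]

theorem pvPrefix_fst (cs : List Char) :
    (pvPrefix cs).1.1 = (List.range (cs.length + 1)).map (pvPr cs) := by
  unfold pvPrefix
  rw [pvPrefix_spec]
  simp [List.range_succ_eq_map, pvPr_zero, Function.comp]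

theorem pvPrefix_snd (cs : List Char) :
    (pvPrefix cs).1.2 = (List.range (cs.length + 1)).map (pvPc cs) := by
  unfold pvPrefix
  rw [pvPrefix_spec]
  simp [List.range_succ_eq_map, pvPc_zero, Function.comp]

theorem pvPr_succ (cs : List Char) (j : Nat) (hj : j < cs.length) :
    pvPr cs (j + 1) = pvPr cs j + pvDR cs[j] := by
  unfold pvPr
  rw [List.map_take, List.map_take, List.sum_take_succ (cs.map pvDR) j (by simpa using hj)]
  simp


theorem pvPc_succ (cs : List Char) (j : Nat) (hj : j < cs.length) :
    pvPc cs (j + 1) = pvPc cs j + pvDC cs[j] := by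
  unfold pvPc
  rw [List.map_take, List.map_take, List.sum_take_succ (cs.map pvDC) j (by simpa using hj)]
  simp

-- B's scan equals (j - i) + the reference walk on the suffix from j
theorem pvFirstEscape_eq_go (n sr sc : Int) (cs : List Char) (i : Nat) :
    ∀ k j, j + k = cs.length → i ≤ j →
    pvFirstEscape n sr sc ((List.range (cs.length + 1)).map (pvPr cs))
        ((List.range (cs.length + 1)).map (pvPc cs)) i cs.length (List.range' j k)
      = ((j : Int) - (i : Int)) +
        pvGo n (cs.drop j) (sr + pvPr cs j - pvPr cs i) (sc + pvPc cs j - pvPc cs i) := by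
  intro k
  induction k with
  | zero =>
      intro j hj _
      rw [List.drop_of_length_le (by omega : cs.length ≤ j)]
      simp only [pvGo, List.range', pvFirstEscape]
      omega
  | succ k ih =>
      intro j hj hij
      have hjlt : j < cs.length := by omega
      have getD_pr : ∀ t, t < cs.length + 1 →
          (((List.range (cs.length + 1)).map (pvPr cs)).getD t 0) = pvPr cs t := by
        intro t ht
        rw [List.getD_eq_getElem?_getD, List.getElem?_map, List.getElem?_range ht]
        rfl
      have getD_pc : ∀ t, t < cs.length + 1 →
          (((List.range (cs.length + 1)).map (pvPc cs)).getD t 0) = pvPc cs t := by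
        intro t ht
        rw [List.getD_eq_getElem?_getD, List.getElem?_map, List.getElem?_range ht]
        rfl
      have hdrop : cs.drop j = cs[j] :: cs.drop (j + 1) :=
        List.drop_eq_getElem_cons hjlt
      rw [List.range'_succ]
      simp only [pvFirstEscape]
      rw [getD_pr (j + 1) (by omega), getD_pr i (by omega),
          getD_pc (j + 1) (by omega), getD_pc i (by omega)]
      rw [hdrop]
      simp only [pvGo]
      rw [pvPr_succ cs j hjlt, pvPc_succ cs j hjlt]
      by_cases h : 0 ≤ sr + (pvPr cs j + pvDR cs[j]) - pvPr cs i ∧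
          sr + (pvPr cs j + pvDR cs[j]) - pvPr cs i < n ∧
          0 ≤ sc + (pvPc cs j + pvDC cs[j]) - pvPc cs i ∧
          sc + (pvPc cs j + pvDC cs[j]) - pvPc cs i < n
      · have h1 : 0 ≤ sr + pvPr cs j - pvPr cs i + pvDR cs[j] ∧
            sr + pvPr cs j - pvPr cs i + pvDR cs[j] < n ∧
            0 ≤ sc + pvPc cs j - pvPc cs i + pvDC cs[j] ∧
            sc + pvPc cs j - pvPc cs i + pvDC cs[j] < n := by
          constructor; · omega
          constructor; · omega
          constructor; · omega
          · omega
        rw [if_pos h, if_pos h1, ih (j + 1) (by omega) (by omega)]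
        have e1 : sr + pvPr cs (j + 1) - pvPr cs i = sr + pvPr cs j - pvPr cs i + pvDR cs[j] := by
          rw [pvPr_succ cs j hjlt]; ring
        have e2 : sc + pvPc cs (j + 1) - pvPc cs i = sc + pvPc cs j - pvPc cs i + pvDC cs[j] := by
          rw [pvPc_succ cs j hjlt]; ring
        rw [e1, e2]
        push_cast
        ring
      · have h1 : ¬ (0 ≤ sr + pvPr cs j - pvPr cs i + pvDR cs[j] ∧
            sr + pvPr cs j - pvPr cs i + pvDR cs[j] < n ∧
            0 ≤ sc + pvPc cs j - pvPc cs i + pvDC cs[j] ∧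
            sc + pvPc cs j - pvPc cs i + pvDC cs[j] < n) := by
          intro hc; exact h ⟨by omega, by omega, by omega, by omega⟩
        rw [if_neg h, if_neg h1]
        ring

-- A's walk from a suffix starts at the start position shifted by the prefix difference 0
theorem pvGo_drop (n : Int) (cs : List Char) (i : Nat) (sr sc : Int) :
    pvGo n (cs.drop i) (sr + pvPr cs i - pvPr cs i) (sc + pvPc cs i - pvPc cs i)
      = pvGo n (cs.drop i) sr sc := by
  congr 1 <;> ring

-- ===== VERDICT (by name: the statement is the Claim_ definition above) =====
theorem executeInstructions_spec : Claim_equal_executeInstructions := by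
  intro n startPos s _ hpre
  unfold Spec_executeInstructions executeInstructions executeInstructions_alt
  have h0 : PySem.List.pyGet? startPos 0 = some (startPos.getD 0 0) := by
    unfold Pre_executeInstructions at hpre
    simp [PySem.List.pyGet?, PySem.List.pyIdx?]
    match startPos, hpre with
    | a :: b :: t, _ => simp
  have h1 : PySem.List.pyGet? startPos 1 = some (startPos.getD 1 0) := by
    unfold Pre_executeInstructions at hpre
    simp [PySem.List.pyGet?, PySem.List.pyIdx?]
    match startPos, hpre with
    | a :: b :: t, _ => simp
  rw [h0, h1]
  simp only [Option.elim]
  rw [PySem.List.foldl_append_singleton_eq_map]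
  simp only [pvPrefix_fst, pvPrefix_snd, List.nil_append]
  apply List.map_congr_left
  intro i hi
  have hi' : i ≤ s.toList.length := le_of_lt (List.mem_range.mp hi)
  rw [pvFirstEscape_eq_go n (startPos.getD 0 0) (startPos.getD 1 0) s.toList i
        (s.toList.length - i) i (by omega) le_rfl,
      pvGo_drop,
      pvA_inner_eq_go n (s.toList.drop i) (startPos.getD 0 0) (startPos.getD 1 0) 0]
  ring
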